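-- pv_equiv track=rewrite | github.com/maciejczyzewski/fast_gpu_voronoi | main.py | mod_step_function__star
-- ===== SOURCE A (Python) =====
-- import math
--
-- oo = 16776832
--
-- def mod_step_function__star(shape, num, config=None):
--     def LogStar(n):
--         if n <= 1:
--             return 0
--         if 1 < n and n <= 8:
--             return 1
--         if 8 < n and n <= 64:
--             return 2
--         if 64 < n and n <= 1024:
--             return 3
--         if 1024 < n and n <= 65536:
--             return 4
--         if 65536 < n:
--             return 5
--     n = LogStar(num)
--     steps, i = [], 0
--     for factor in range(1, +oo, 1):
--         i += 1
--         f = math.ceil(max(shape) / (3**(factor)))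
--         steps.append(f)
--         if f <= 1 or i == n + 1:
--             break
--     return steps + [1]
-- ===== SOURCE B (Python) =====
-- def mod_step_function__star(shape, num, config=None):
--     # Recursive repeated division: keep a running quotient c and apply exact
--     # ceiling-division by 3 each step (ceil(ceil(m/3^k)/3) == ceil(m/3^(k+1))),
--     # instead of recomputing ceil(max(shape)/3**k) with growing powers each turn.
--     def go(c, budget):
--         c = -(-c // 3)
--         if c <= 1 or budget == 0:
--             return [c, 1]
--         return [c] + go(c, budget - 1)
--     n = 0
--     for t in (1, 8, 64, 1024, 65536):
--         if num > t:
--             n += 1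
--     return go(max(shape), n)
-- ===== Notes on version B (the rewrite author's own statement) =====
-- stated objective: faster
-- what changed: Replaces A's loop that recomputes max(shape) and ceil(max/3**k) with a growing power each iteration by a recursive repeated-division scheme: max is taken once and a single running quotient is ceiling-divided by 3 at each step (correct by ceil(ceil(m/a)/b)=ceil(m/(ab))), the budget n coming from counting thresholds instead of the LogStar if-chain, the list built by recursion instead of append-and-break.
import Mathlib
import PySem

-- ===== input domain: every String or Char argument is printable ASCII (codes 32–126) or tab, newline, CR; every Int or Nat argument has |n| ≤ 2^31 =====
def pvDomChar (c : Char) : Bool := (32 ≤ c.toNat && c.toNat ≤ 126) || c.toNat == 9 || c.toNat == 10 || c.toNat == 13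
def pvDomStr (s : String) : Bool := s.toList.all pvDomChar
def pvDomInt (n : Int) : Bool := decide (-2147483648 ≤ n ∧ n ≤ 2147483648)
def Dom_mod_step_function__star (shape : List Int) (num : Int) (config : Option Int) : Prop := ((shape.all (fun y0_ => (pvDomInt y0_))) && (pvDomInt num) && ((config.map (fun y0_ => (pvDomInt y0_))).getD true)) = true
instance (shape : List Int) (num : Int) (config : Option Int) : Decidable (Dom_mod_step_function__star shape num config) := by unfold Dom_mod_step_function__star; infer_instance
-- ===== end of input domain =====

-- B replaces A's per-iteration ceil(max/3**k) with a recursive running quotient that is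
-- ceiling-divided by 3 each step (using ceil(ceil(m/a)/b) = ceil(m/(ab))), with the budget
-- obtained by counting thresholds instead of the LogStar if-chain.

-- ===== PORT A =====
-- LogStar's if-chain, branch for branch (the final '65536 < n' branch is the residual else).
def pvLogStar (n : Int) : Int :=
  if n ≤ 1 then 0
  else if 1 < n ∧ n ≤ 8 then 1
  else if 8 < n ∧ n ≤ 64 then 2
  else if 64 < n ∧ n ≤ 1024 then 3
  else if 1024 < n ∧ n ≤ 65536 then 4
  else 5

-- math.ceil(max(shape) / 3**factor): on |m| ≤ 2^31 the float quotient never rounds across an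
-- integer, so Python's float ceil equals exact integer ceiling division -((-m) // 3**factor).
def pvCeilA (m k : Int) : Int := -(PySem.Int.floordiv (-m) (3 ^ k.toNat))

-- the for-loop over range(1, oo) with its two-condition break; fuel = oo - 1 = len(range(1, oo))
def pvLoopA (m n : Int) (factor i : Int) (steps : List Int) : Nat → List Int
  | 0 => steps
  | Nat.succ fuel =>
    let i' := i + 1
    let f := pvCeilA m factor
    let steps' := steps ++ [f]
    if f ≤ 1 ∨ i' = n + 1 then steps' else pvLoopA m n (factor + 1) i' steps' fuel

def mod_step_function__star (shape : List Int) (num : Int) (config : Option Int) : List Int :=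
  let n := pvLogStar num
  match PySem.List.max? shape (fun y => y) with
  | none => []  -- max([]) raises ValueError; excluded by Pre_
  | some m => pvLoopA m n 1 0 [] 16776831 ++ [1]

-- ===== PORT B =====
-- -(-c // 3): exact ceiling division of the running quotient by 3
def pvCdiv3 (c : Int) : Int := -(PySem.Int.floordiv (-c) 3)

-- the inner recursive 'go(c, budget)'
def pvGo (c : Int) (b : Nat) : List Int :=
  let c' := pvCdiv3 c
  if h : c' ≤ 1 ∨ b = 0 then [c', 1] else c' :: pvGo c' (b - 1)
termination_by b
decreasing_by omega

def mod_step_function__star_alt (shape : List Int) (num : Int) (config : Option Int) : List Int :=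
  let n : Int := ([1, 8, 64, 1024, 65536] : List Int).foldl (fun a t => if t < num then a + 1 else a) 0
  match PySem.List.max? shape (fun y => y) with
  | none => []  -- max([]) raises ValueError; excluded by Pre_
  | some m => pvGo m n.toNat

-- ===== PRECONDITION & SPEC =====
-- Pre_ excludes only the empty shape, on which Python's max(shape) raises ValueError (B raises there too).
def Pre_mod_step_function__star (shape : List Int) (num : Int) (config : Option Int) : Prop := shape ≠ []
instance (shape : List Int) (num : Int) (config : Option Int) : Decidable (Pre_mod_step_function__star shape num config) := by unfold Pre_mod_step_function__star; infer_instance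

def pvWitness_mod_step_function__star : List Int × Int × Option Int := ([10, 3], 70000, none)

def Spec_mod_step_function__star (shape : List Int) (num : Int) (config : Option Int) (out : List Int) : Prop := out = mod_step_function__star_alt shape num config
instance (shape : List Int) (num : Int) (config : Option Int) (out : List Int) : Decidable (Spec_mod_step_function__star shape num config out) := by unfold Spec_mod_step_function__star; infer_instance

-- ===== CLAIM (what is proved, stated in full; the proofs are below) =====
def Claim_equal_mod_step_function__star : Prop := ∀ (shape : List Int) (num : Int) (config : Option Int), Dom_mod_step_function__star shape num config → Pre_mod_step_function__star shape num config → Spec_mod_step_function__star shape num config (mod_step_function__star shape num config)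

-- ===== LEMMAS AND PROOFS =====

-- A's LogStar equals B's threshold count, and lies between 0 and 5.
theorem pvLogStar_eq_count (num : Int) :
    pvLogStar num = ([1, 8, 64, 1024, 65536] : List Int).foldl (fun a t => if t < num then a + 1 else a) 0 := by
  simp only [pvLogStar, List.foldl]
  split_ifs <;> omega

theorem pvLogStar_bounds (num : Int) : 0 ≤ pvLogStar num ∧ pvLogStar num ≤ 5 := by
  simp only [pvLogStar]; split_ifs <;> omega

-- common shape of both results before the trailing [1]; recursion on the remaining iteration count
def pvSeg (m : Int) (k : Int) : Nat → List Int
  | 0 => []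
  | Nat.succ j =>
    let f := pvCeilA m k
    if f ≤ 1 ∨ j = 0 then [f] else f :: pvSeg m (k + 1) j

-- A's loop, started j iterations before the i = n + 1 break, appends pvSeg
theorem pvLoopA_eq_pvSeg (m n : Int) : ∀ (j fuel : Nat) (steps : List Int),
    j ≤ fuel → 1 ≤ j → (j : Int) ≤ n + 1 →
    pvLoopA m n (n + 2 - j) (n + 1 - j) steps fuel = steps ++ pvSeg m (n + 2 - j) j := by
  intro j
  induction j with
  | zero => intro fuel steps _ h1 _; omega
  | succ j ih =>
    intro fuel steps hfuel _ hj
    match fuel with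
    | 0 => omega
    | Nat.succ fuel =>
      simp only [pvLoopA, pvSeg]
      push_cast
      by_cases hf : pvCeilA m (n + 2 - (↑j + 1)) ≤ 1
      · rw [if_pos (Or.inl hf), if_pos (Or.inl hf)]
      · by_cases hj0 : j = 0
        · rw [if_pos (Or.inr (by omega)), if_pos (Or.inr hj0)]
        · rw [if_neg (fun hc => hc.elim hf (fun h => hj0 (by omega))),
              if_neg (fun hc => hc.elim hf hj0)]
          rw [show n + 2 - (↑j + 1) + 1 = n + 2 - ↑j by ring,
              show n + 1 - (↑j + 1) + 1 = n + 1 - ↑j by ring,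
              ih fuel _ (by omega) (by omega) (by push_cast at hj ⊢; omega)]
          simp

-- ceiling-division composition: one more /3 on the running quotient is one more power of 3
theorem pvCdiv3_ceilA (m : Int) (k : Nat) :
    pvCdiv3 (pvCeilA m (k : Int)) = pvCeilA m ((k : Int) + 1) := by
  have hk3 : (0:Int) < 3 ^ k := by positivity
  have hbr := (PySem.Int.neg_floordiv_neg_eq_iff_of_pos (a := m) (b := 3 ^ k)
    (q := -(PySem.Int.floordiv (-m) (3 ^ k))) hk3).mp rfl
  set c : Int := -(PySem.Int.floordiv (-m) (3 ^ k)) with hc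
  have hcbr := (PySem.Int.neg_floordiv_neg_eq_iff_of_pos (a := c) (b := 3)
    (q := -(PySem.Int.floordiv (-c) 3)) (by omega)).mp rfl
  set q : Int := -(PySem.Int.floordiv (-c) 3) with hq
  have h1 : pvCeilA m ((k : Int) + 1) = q := by
    rw [pvCeilA, show ((k : Int) + 1).toNat = k + 1 by omega]
    rw [PySem.Int.neg_floordiv_neg_eq_iff_of_pos (by positivity)]
    constructor
    · have h3 : (q - 1) * 3 ≤ c - 1 := by have := hcbr.1; omega
      calc (q - 1) * 3 ^ (k + 1) = (q - 1) * 3 * 3 ^ k := by ring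
        _ ≤ (c - 1) * 3 ^ k := mul_le_mul_of_nonneg_right h3 hk3.le
        _ < m := hbr.1
    · calc m ≤ c * 3 ^ k := hbr.2
        _ ≤ q * 3 * 3 ^ k := mul_le_mul_of_nonneg_right hcbr.2 hk3.le
        _ = q * 3 ^ (k + 1) := by ring
  rw [h1]
  simp only [pvCdiv3, pvCeilA, Int.toNat_natCast, hc, hq]

-- B's recursion started from the k-th quotient equals pvSeg from factor k+1, plus the trailing 1
theorem pvGo_eq_pvSeg (m : Int) : ∀ (b k : Nat),
    pvGo (pvCeilA m (k : Int)) b = pvSeg m ((k : Int) + 1) (b + 1) ++ [1] := by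
  have seg_succ : ∀ (k : Int) (j : Nat), pvSeg m k (j + 1)
      = if pvCeilA m k ≤ 1 ∨ j = 0 then [pvCeilA m k] else pvCeilA m k :: pvSeg m (k + 1) j :=
    fun _ _ => rfl
  intro b
  induction b with
  | zero =>
    intro k
    rw [pvGo, pvCdiv3_ceilA, seg_succ, dif_pos (Or.inr rfl), if_pos (Or.inr rfl)]
    rfl
  | succ b ih =>
    intro k
    rw [pvGo, pvCdiv3_ceilA, seg_succ]
    by_cases hf : pvCeilA m ((k : Int) + 1) ≤ 1
    · rw [dif_pos (Or.inl hf), if_pos (Or.inl hf)]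
      rfl
    · rw [dif_neg (by simp [hf]), if_neg (by simp [hf])]
      have hk : ((k : Int) + 1) = ((k + 1 : Nat) : Int) := by push_cast; ring
      rw [show b + 1 - 1 = b from rfl, hk, ih (k + 1), ← List.cons_append]

-- ===== VERDICT (by name: the statement is the Claim_ definition above) =====
theorem mod_step_function__star_spec : Claim_equal_mod_step_function__star := by
  intro shape num config _ _
  unfold Spec_mod_step_function__star mod_step_function__star mod_step_function__star_alt
  rw [← pvLogStar_eq_count num]
  cases hm : PySem.List.max? shape (fun y => y) with
  | none => rfl
  | some m =>
    obtain ⟨h0, h5⟩ := pvLogStar_bounds num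
    set n := pvLogStar num with hn
    have hcast : ((n.toNat + 1 : Nat) : Int) = n + 1 := by
      push_cast; rw [Int.toNat_of_nonneg h0]
    have hA := pvLoopA_eq_pvSeg m n (n.toNat + 1) 16776831 []
      (by omega) (by omega) (by rw [hcast])
    rw [hcast] at hA
    simp only [show n + 2 - (n + 1) = 1 by ring, show n + 1 - (n + 1) = 0 by ring,
      List.nil_append] at hA
    have hB := pvGo_eq_pvSeg m n.toNat 0
    have hm0 : pvCeilA m ((0 : Nat) : Int) = m := by
      simp [pvCeilA, PySem.Int.floordiv]
    rw [hm0] at hB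
    show pvLoopA m n 1 0 [] 16776831 ++ [1] = pvGo m n.toNat
    rw [hA, hB]
    norm_num
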